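-- pv_equiv track=rewrite | github.com/BuysDB/SingleCellMultiOmics | singlecellmultiomics/utils/sequtils.py | create_MD_tag
-- ===== SOURCE A (Python) =====
-- def create_MD_tag(reference_seq, query_seq):
--     """Create MD tag
--     Args:
--         reference_seq (str) : reference sequence of alignment
--         query_seq (str) : query bases of alignment
--     Returns:
--         md_tag(str) : md description of the alignment
--     """
--     no_change = 0
--     md = []
--     for ref_base, query_base in zip(reference_seq.upper(), query_seq):
--         if ref_base.upper() == query_base:
--             no_change += 1
--         else:
--             if no_change > 0:
--                 md.append(str(no_change))
--             md.append(ref_base)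
--             no_change = 0
--     if no_change > 0:
--         md.append(str(no_change))
--     return ''.join(md)
-- ===== SOURCE B (Python) =====
-- def create_MD_tag(reference_seq, query_seq):
--     """Create MD tag by scanning maximal runs of matches/mismatches with two indices."""
--     pairs = list(zip(reference_seq.upper(), query_seq))
--     n = len(pairs)
--     parts = []
--     i = 0
--     while i < n:
--         j = i + 1
--         if pairs[i][0] == pairs[i][1]:
--             while j < n and pairs[j][0] == pairs[j][1]:
--                 j += 1
--             parts.append(str(j - i))
--         else:
--             while j < n and pairs[j][0] != pairs[j][1]:
--                 j += 1
--             parts.append(''.join(p[0] for p in pairs[i:j]))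
--         i = j
--     return ''.join(parts)
-- ===== Notes on version B (the rewrite author's own statement) =====
-- stated objective: alternative
-- what changed: Replaces A's element-at-a-time loop with an incremental match counter flushed at mismatches and at the end by a two-index scan over maximal runs: each outer step consumes a whole match run (emitting its length) or mismatch run (emitting its reference bases at once).
import Mathlib
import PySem

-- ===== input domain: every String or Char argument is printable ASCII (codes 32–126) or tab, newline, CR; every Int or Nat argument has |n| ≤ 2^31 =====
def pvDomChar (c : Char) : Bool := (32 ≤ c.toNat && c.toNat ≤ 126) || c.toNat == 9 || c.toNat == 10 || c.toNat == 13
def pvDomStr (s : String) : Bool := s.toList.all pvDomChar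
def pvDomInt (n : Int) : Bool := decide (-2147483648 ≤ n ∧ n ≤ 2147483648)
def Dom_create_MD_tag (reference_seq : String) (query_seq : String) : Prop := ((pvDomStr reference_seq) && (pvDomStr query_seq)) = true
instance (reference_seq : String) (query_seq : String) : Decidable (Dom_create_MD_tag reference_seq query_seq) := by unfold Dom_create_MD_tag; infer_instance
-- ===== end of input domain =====

-- B replaces A's incremental match counter with a two-index scan of maximal match/mismatch runs (alternative decomposition, same cost).

-- ===== PORT A =====
-- A's flush snippet 'if no_change > 0: md.append(str(no_change))' (appears twice in A)
def pvAFlush (nc : Int) (md : List String) : List String :=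
  if nc > 0 then md ++ [PySem.Int.toStr nc] else md

-- A's for-loop over zip(reference_seq.upper(), query_seq) with state (no_change, md)
def pvALoop : List (Char × Char) → Int → List String → List String
  | [], nc, md => pvAFlush nc md
  | (r, q) :: rest, nc, md =>
    if PySem.Chars.upperChar r = q then pvALoop rest (nc + 1) md
    else pvALoop rest 0 (pvAFlush nc md ++ [String.ofList [r]])

def create_MD_tag (reference_seq : String) (query_seq : String) : String :=
  PySem.Str.join "" (pvALoop (List.zip (PySem.Str.upper reference_seq).toList query_seq.toList) 0 [])

-- ===== PORT B =====
def pvEqPair (p : Char × Char) : Bool := p.1 == p.2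
def pvNePair (p : Char × Char) : Bool := p.1 != p.2

-- Source B's outer while: each step consumes one maximal run (the inner 'while j < n and …' scans are takeWhile/dropWhile)
def pvBRuns : List (Char × Char) → List String
  | [] => []
  | p :: rest =>
    if p.1 = p.2 then
      PySem.Int.toStr (1 + ((rest.takeWhile pvEqPair).length : Int)) ::
        pvBRuns (rest.dropWhile pvEqPair)
    else
      String.ofList (p.1 :: (rest.takeWhile pvNePair).map Prod.fst) ::
        pvBRuns (rest.dropWhile pvNePair)
termination_by l => l.length
decreasing_by
  · exact Nat.lt_succ_of_le (List.length_dropWhile_le _ _)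
  · exact Nat.lt_succ_of_le (List.length_dropWhile_le _ _)

def create_MD_tag_alt (reference_seq : String) (query_seq : String) : String :=
  PySem.Str.join "" (pvBRuns (List.zip (PySem.Str.upper reference_seq).toList query_seq.toList))

-- ===== PRECONDITION & SPEC =====
def Spec_create_MD_tag (reference_seq : String) (query_seq : String) (out : String) : Prop := out = create_MD_tag_alt reference_seq query_seq
instance (reference_seq : String) (query_seq : String) (out : String) : Decidable (Spec_create_MD_tag reference_seq query_seq out) := by unfold Spec_create_MD_tag; infer_instance

-- ===== CLAIM (what is proved, stated in full; the proofs are below) =====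
def Claim_equal_create_MD_tag : Prop := ∀ (reference_seq : String) (query_seq : String), Dom_create_MD_tag reference_seq query_seq → Spec_create_MD_tag reference_seq query_seq (create_MD_tag reference_seq query_seq)

-- ===== LEMMAS AND PROOFS =====

lemma pvCharLeIff (a b : Char) : a ≤ b ↔ a.toNat ≤ b.toNat := ge_iff_le

lemma pvUpperFix (c : Char) :
    PySem.Chars.upperChar (PySem.Chars.upperChar c) = PySem.Chars.upperChar c := by
  unfold PySem.Chars.upperChar PySem.Chars.islower
  split_ifs with h1 h2
  · exfalso
    simp only [Bool.and_eq_true, decide_eq_true_eq, pvCharLeIff] at h1 h2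
    have ha : ('a').toNat = 97 := by decide
    have hz : ('z').toNat = 122 := by decide
    rw [ha, hz] at h1
    have hv : Nat.isValidChar (c.toNat - 32) := by left; omega
    have ht : (Char.ofNat (c.toNat - 32)).toNat = c.toNat - 32 := by
      simp [Char.ofNat, Char.ofNatAux, hv]
    rw [ha, hz, ht] at h2
    omega
  · rfl
  · rfl

-- chars of both ports' output lists, concatenated
def pvJ (l : List String) : List Char := (l.map String.toList).flatten

-- A's loop with the accumulator stripped off
def pvPend (nc : Int) : List (Char × Char) → List String
  | [] => if nc > 0 then [PySem.Int.toStr nc] else []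
  | (r, q) :: rest =>
    if PySem.Chars.upperChar r = q then pvPend (nc + 1) rest
    else (if nc > 0 then [PySem.Int.toStr nc] else []) ++ String.ofList [r] :: pvPend 0 rest

lemma pvALoop_accu (pairs : List (Char × Char)) :
    ∀ (nc : Int) (md : List String), pvALoop pairs nc md = md ++ pvPend nc pairs := by
  induction pairs with
  | nil => intro nc md; simp only [pvALoop, pvPend, pvAFlush]; split_ifs <;> simp
  | cons p rest ih =>
    obtain ⟨r, q⟩ := p
    intro nc md
    by_cases h : PySem.Chars.upperChar r = q
    · simp [pvALoop, pvPend, h, ih]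
    · simp only [pvALoop, pvPend, pvAFlush, h, if_false, ih]
      split_ifs <;> simp

-- run-level correspondence: A's pending counter vs B's explicit runs, compared on chars
lemma pvQ : ∀ (n : Nat) (pairs : List (Char × Char)), pairs.length ≤ n →
    (∀ p ∈ pairs, PySem.Chars.upperChar p.1 = p.1) →
    ((∀ k : Int, 0 < k → pvJ (pvPend k pairs) =
        PySem.Int.toChars (k + ((pairs.takeWhile pvEqPair).length : Int)) ++
          pvJ (pvBRuns (pairs.dropWhile pvEqPair)))
     ∧ pvJ (pvPend 0 pairs) =
        (pairs.takeWhile pvNePair).map Prod.fst ++ pvJ (pvBRuns (pairs.dropWhile pvNePair))) := by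
  intro n
  induction n with
  | zero =>
    intro pairs hl _
    have hnil : pairs = [] := List.eq_nil_of_length_eq_zero (Nat.le_zero.mp hl)
    subst hnil
    constructor
    · intro k hk
      simp [pvPend, pvBRuns, pvJ, hk, PySem.Int.toList_toStr]
    · simp [pvPend, pvBRuns, pvJ]
  | succ n ih =>
    intro pairs hl H
    cases pairs with
    | nil =>
      constructor
      · intro k hk
        simp [pvPend, pvBRuns, pvJ, hk, PySem.Int.toList_toStr]
      · simp [pvPend, pvBRuns, pvJ]
    | cons p rest =>
      obtain ⟨r, q⟩ := p
      have hr : PySem.Chars.upperChar r = r := H (r, q) (List.mem_cons_self)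
      have Hrest : ∀ p ∈ rest, PySem.Chars.upperChar p.1 = p.1 :=
        fun p hp => H p (List.mem_cons_of_mem _ hp)
      have hlen : rest.length ≤ n := by simp at hl; omega
      have IH := ih rest hlen Hrest
      by_cases hq : r = q
      · have hcond : PySem.Chars.upperChar r = q := by rw [hr, hq]
        have he : pvEqPair (r, q) = true := by simp [pvEqPair, hq]
        have hne : pvNePair (r, q) = false := by simp [pvNePair, hq]
        constructor
        · intro k hk
          have h1 := IH.1 (k + 1) (by omega)
          simp only [pvPend, hcond, if_pos, List.takeWhile_cons, List.dropWhile_cons, he,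
            List.length_cons]
          rw [h1]
          congr 2
          push_cast
          ring
        · have h1 := IH.1 1 (by norm_num)
          simp only [pvPend, hcond, if_pos, List.takeWhile_cons, List.dropWhile_cons, hne,
            Bool.false_eq_true, if_false, List.map_nil, List.nil_append, zero_add]
          rw [h1]
          simp [pvBRuns, hq, pvJ, PySem.Int.toList_toStr]
      · have hcond : ¬ (PySem.Chars.upperChar r = q) := by rw [hr]; exact hq
        have he : pvEqPair (r, q) = false := by simp [pvEqPair, hq]
        have hne : pvNePair (r, q) = true := by simp [pvNePair, hq]
        constructor
        · intro k hk
          have h2 := IH.2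
          simp only [pvPend, hcond, if_false, hk, if_pos, List.takeWhile_cons,
            List.dropWhile_cons, he, Bool.false_eq_true, if_false, List.length_nil]
          simp only [pvJ, List.map_cons, List.map_append, List.flatten_cons, List.flatten_append,
            List.map_nil, List.flatten_nil] at h2 ⊢
          rw [h2]
          simp [pvBRuns, hq, PySem.Int.toList_toStr, String.toList_ofList]
        · have h2 := IH.2
          simp only [pvPend, hcond, if_false, List.takeWhile_cons, List.dropWhile_cons, hne,
            if_true, gt_iff_lt, lt_irrefl, List.nil_append, List.map_cons]
          simp only [pvJ, List.map_cons, List.flatten_cons, String.toList_ofList] at h2 ⊢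
          rw [h2]
          simp

lemma pvMain (pairs : List (Char × Char))
    (H : ∀ p ∈ pairs, PySem.Chars.upperChar p.1 = p.1) :
    pvJ (pvPend 0 pairs) = pvJ (pvBRuns pairs) := by
  cases pairs with
  | nil => simp [pvPend, pvBRuns, pvJ]
  | cons p rest =>
    obtain ⟨r, q⟩ := p
    have hr : PySem.Chars.upperChar r = r := H (r, q) (List.mem_cons_self)
    have Hrest : ∀ p ∈ rest, PySem.Chars.upperChar p.1 = p.1 :=
      fun p hp => H p (List.mem_cons_of_mem _ hp)
    have IH := pvQ rest.length rest le_rfl Hrest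
    by_cases hq : r = q
    · have hcond : PySem.Chars.upperChar r = q := by rw [hr, hq]
      have h1 := IH.1 1 (by norm_num)
      simp only [pvPend, hcond, if_pos, zero_add]
      rw [h1]
      simp [pvBRuns, hq, pvJ, PySem.Int.toList_toStr]
    · have hcond : ¬ (PySem.Chars.upperChar r = q) := by rw [hr]; exact hq
      have h2 := IH.2
      simp only [pvPend, hcond, if_false, gt_iff_lt, lt_irrefl, List.nil_append]
      simp only [pvJ, List.map_cons, List.flatten_cons, String.toList_ofList] at h2 ⊢
      rw [h2]
      simp [pvBRuns, hq, String.toList_ofList]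

lemma pvIntercalate_nil (xs : List (List Char)) : List.intercalate [] xs = xs.flatten := by
  induction xs with
  | nil => rfl
  | cons a l ih => cases l <;> simp_all [List.intercalate, List.intersperse]

lemma pvJoinJ (l : List String) : PySem.Str.join "" l = String.ofList (pvJ l) := by
  simp [PySem.Str.join, PySem.Chars.join, pvJ, pvIntercalate_nil]

-- ===== VERDICT (by name: the statement is the Claim_ definition above) =====
theorem create_MD_tag_spec : Claim_equal_create_MD_tag := by
  intro reference_seq query_seq _
  unfold Spec_create_MD_tag create_MD_tag create_MD_tag_alt
  have H : ∀ p ∈ List.zip (PySem.Str.upper reference_seq).toList query_seq.toList,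
      PySem.Chars.upperChar p.1 = p.1 := by
    intro p hp
    have h1 : p.1 ∈ (PySem.Str.upper reference_seq).toList := (List.of_mem_zip hp).1
    rw [PySem.Str.toList_upper, PySem.Chars.upper] at h1
    obtain ⟨c, _, hc⟩ := List.mem_map.mp h1
    rw [← hc]
    exact pvUpperFix c
  rw [pvALoop_accu, List.nil_append, pvJoinJ, pvJoinJ, pvMain _ H]
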